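-- pv_equiv track=rewrite | github.com/roed314/ModularCurves | upload/rewrite_labels.py | class_to_int
-- ===== SOURCE A (Python) =====
-- import re, string
--
-- def class_to_int(k):
--     if k.isdigit():
--         return int(k)
--     elif k.isalpha() and k.islower():
--         kk = [string.ascii_lowercase.index(ch) for ch in k]
--     elif k.isalpha() and k.isupper():
--         kk = [string.ascii_uppercase.index(ch) for ch in k]
--     else:
--         raise ValueError("Invalid class", k)
--     kk.reverse()
--     return sum(kk[i] * 26 ** i for i in range(len(kk)))
-- ===== SOURCE B (Python) =====
-- import string
--
-- def class_to_int(k):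
--     if k.isdigit():
--         return int(k)
--     elif k.isalpha() and k.islower():
--         letters = string.ascii_lowercase
--     elif k.isalpha() and k.isupper():
--         letters = string.ascii_uppercase
--     else:
--         raise ValueError("Invalid class", k)
--     total = 0
--     for ch in k:
--         total = total * 26 + letters.index(ch)
--     return total
-- ===== Notes on version B (the rewrite author's own statement) =====
-- stated objective: faster
-- what changed: Replaces A's build-list / reverse / explicit 26**i power sum with a single forward Horner accumulator (total = total*26 + index), building no intermediate list and computing no powers.
import Mathlib
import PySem

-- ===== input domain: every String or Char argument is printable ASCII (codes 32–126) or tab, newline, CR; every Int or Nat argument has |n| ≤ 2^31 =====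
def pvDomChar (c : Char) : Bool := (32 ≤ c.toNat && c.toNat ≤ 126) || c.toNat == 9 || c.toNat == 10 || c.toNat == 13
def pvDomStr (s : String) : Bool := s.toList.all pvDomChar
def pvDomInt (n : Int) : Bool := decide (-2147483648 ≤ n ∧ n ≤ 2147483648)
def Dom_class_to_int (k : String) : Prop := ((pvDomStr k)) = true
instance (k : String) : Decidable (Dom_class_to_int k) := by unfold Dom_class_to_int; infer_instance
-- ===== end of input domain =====

-- B replaces A's build-list/reverse/power-sum with a forward Horner accumulator (same guards, same ValueError path excluded by Pre_).

-- ===== PORT A =====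
-- shared primitive ports of the Python string tests (exact on the ASCII domain)
def pyStrIsdigit (cs : List Char) : Bool := !cs.isEmpty && cs.all PySem.Str.isdigit
def pyStrIsalpha (cs : List Char) : Bool := !cs.isEmpty && cs.all PySem.Str.isalpha
-- s.islower(): at least one cased character and no uppercase one (cased = letter on ASCII)
def pyStrIslower (cs : List Char) : Bool := cs.any PySem.Str.isalpha && cs.all (fun c => !PySem.Str.isupper c)
def pyStrIsupper (cs : List Char) : Bool := cs.any PySem.Str.isalpha && cs.all (fun c => !PySem.Str.islower c)
-- string.ascii_lowercase.index(ch) / string.ascii_uppercase.index(ch); getD 0 is unreachable under the guards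
def lowerIdx (c : Char) : Int := ((PySem.List.index? "abcdefghijklmnopqrstuvwxyz".toList c).getD 0 : Nat)
def upperIdx (c : Char) : Int := ((PySem.List.index? "ABCDEFGHIJKLMNOPQRSTUVWXYZ".toList c).getD 0 : Nat)

def class_to_int (k : String) : Int :=
  let cs := k.toList
  if pyStrIsdigit cs then (PySem.Int.ofStr? k).getD 0   -- int(k); ofStr? is some under the digit guard
  else
    let kk? : Option (List Int) :=
      if pyStrIsalpha cs && pyStrIslower cs then some (cs.map lowerIdx)
      else if pyStrIsalpha cs && pyStrIsupper cs then some (cs.map upperIdx)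
      else none                                          -- raise ValueError: excluded by Pre_
    match kk? with
    | none => 0
    | some kk0 =>
      let kk := kk0.reverse
      ((PySem.List.pyRange 0 kk.length 1).map (fun i => PySem.List.pyGetD kk i 0 * 26 ^ i.toNat)).sum

-- ===== PORT B =====
def class_to_int_alt (k : String) : Int :=
  let cs := k.toList
  if pyStrIsdigit cs then (PySem.Int.ofStr? k).getD 0
  else if pyStrIsalpha cs && pyStrIslower cs then cs.foldl (fun t c => t * 26 + lowerIdx c) 0
  else if pyStrIsalpha cs && pyStrIsupper cs then cs.foldl (fun t c => t * 26 + upperIdx c) 0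
  else 0                                                 -- raise ValueError: excluded by Pre_

-- ===== PRECONDITION & SPEC =====
-- Pre_ excludes exactly the inputs on which A raises ValueError: strings that are
-- neither all-digits, nor all-lowercase letters, nor all-uppercase letters (incl. the empty string).
def Pre_class_to_int (k : String) : Prop :=
  pyStrIsdigit k.toList = true ∨ (pyStrIsalpha k.toList && pyStrIslower k.toList) = true ∨
    (pyStrIsalpha k.toList && pyStrIsupper k.toList) = true
instance (k : String) : Decidable (Pre_class_to_int k) := by unfold Pre_class_to_int; infer_instance
def pvWitness_class_to_int : String := "cm"
def Spec_class_to_int (k : String) (out : Int) : Prop := out = class_to_int_alt k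
instance (k : String) (out : Int) : Decidable (Spec_class_to_int k out) := by unfold Spec_class_to_int; infer_instance

-- ===== CLAIM (what is proved, stated in full; the proofs are below) =====
def Claim_equal_class_to_int : Prop := ∀ (k : String), Dom_class_to_int k → Pre_class_to_int k → Spec_class_to_int k (class_to_int k)

-- ===== LEMMAS AND PROOFS =====

-- A's reversed power sum equals B's forward Horner fold.
theorem powsum_eq_horner (l : List Int) :
    ((List.range l.length).map (fun i => l.getD i 0 * (26:Int) ^ i)).sum
      = l.reverse.foldl (fun t d => t * 26 + d) 0 := by
  induction l with
  | nil => simp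
  | cons d r ih =>
    simp only [List.length_cons, List.range_succ_eq_map, List.map_cons, List.map_map,
      List.sum_cons, List.reverse_cons, List.foldl_append, List.foldl_cons, List.foldl_nil, ← ih]
    simp only [Function.comp_def, List.getD_cons_succ, List.getD_cons_zero, pow_succ, pow_zero,
      ← mul_assoc]
    rw [← List.sum_map_mul_right]
    ring

theorem powsum_pyRange (kk : List Int) :
    ((PySem.List.pyRange 0 kk.length 1).map (fun i => PySem.List.pyGetD kk i 0 * 26 ^ i.toNat)).sum
      = ((List.range kk.length).map (fun i => kk.getD i 0 * (26:Int) ^ i)).sum := by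
  rw [show ((kk.length : Int)) = ((kk.length : Nat) : Int) by simp,
    PySem.List.pyRange_zero_nat kk.length]
  simp [List.map_map, Function.comp_def, PySem.List.pyGetD_natCast, List.getD]

-- ===== VERDICT (by name: the statement is the Claim_ definition above) =====
theorem class_to_int_spec : Claim_equal_class_to_int := by
  intro k _ hpre
  unfold Spec_class_to_int class_to_int class_to_int_alt
  by_cases h1 : pyStrIsdigit k.toList = true
  · simp [h1]
  · by_cases h2 : (pyStrIsalpha k.toList && pyStrIslower k.toList) = true
    · simp only [h1, h2, if_false, if_true, Bool.false_eq_true]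
      rw [powsum_pyRange, powsum_eq_horner]
      simp [List.foldl_map]
    · by_cases h3 : (pyStrIsalpha k.toList && pyStrIsupper k.toList) = true
      · simp only [h1, h2, h3, if_false, if_true, Bool.false_eq_true]
        rw [powsum_pyRange, powsum_eq_horner]
        simp [List.foldl_map]
      · rcases hpre with h | h | h <;> simp_all
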